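-- pv_equiv track=rewrite | github.com/ufz/ogstools | ogstools/variables/variable.py | _split_long_label
-- ===== SOURCE A (Python) =====
-- def _split_long_label(split_at: int, name: str, label: str) -> str:
--     render_label = label.translate({ord(i): None for i in "{}$_^"})
--     is_greek = False
--     length = 0
--     for c in render_label:
--         if not is_greek:
--             length += 1
--         if is_greek and not c.isalpha():
--             is_greek = False
--             length += 1
--         if c == "\\":
--             is_greek = True
--     if length >= split_at:
--         try:
--             split_index = min(
--                 len(name), split_at - label[:split_at][::-1].index(" ")
--             )
--         except ValueError:
--             split_index = len(name)
--         label = label[0:split_index] + "\n" + label[split_index:]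
--     return label
-- ===== SOURCE B (Python) =====
-- def _split_long_label(split_at: int, name: str, label: str) -> str:
--     # Staged-passes formulation: split on backslash and sum per-part contributions
--     # (each escape = 1 + its non-letter remainder), instead of a single stateful scan;
--     # the split index uses rfind instead of reversing and catching ValueError.
--     LETTERS = "abcdefghijklmnopqrstuvwxyzABCDEFGHIJKLMNOPQRSTUVWXYZ"
--     render_label = "".join(c for c in label if c not in "{}$_^")
--     parts = render_label.split("\\")
--     length = len(parts[0]) + sum(1 + len(p.lstrip(LETTERS)) for p in parts[1:])
--     if length >= split_at:
--         cut = label[:split_at]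
--         pos = cut.rfind(" ")
--         if pos < 0:
--             split_index = len(name)
--         else:
--             split_index = min(len(name), split_at - (len(cut) - 1 - pos))
--         label = label[:split_index] + "\n" + label[split_index:]
--     return label
-- ===== Notes on version B (the rewrite author's own statement) =====
-- stated objective: alternative
-- what changed: The rendered length is computed by staged passes -- split the cleaned label on backslash and sum per-part contributions (1 per escape plus the part stripped of its leading letter run) -- instead of A's single scan carrying an is_greek flag, and the split point uses rfind instead of reverse+index with try/except.
import Mathlib
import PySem

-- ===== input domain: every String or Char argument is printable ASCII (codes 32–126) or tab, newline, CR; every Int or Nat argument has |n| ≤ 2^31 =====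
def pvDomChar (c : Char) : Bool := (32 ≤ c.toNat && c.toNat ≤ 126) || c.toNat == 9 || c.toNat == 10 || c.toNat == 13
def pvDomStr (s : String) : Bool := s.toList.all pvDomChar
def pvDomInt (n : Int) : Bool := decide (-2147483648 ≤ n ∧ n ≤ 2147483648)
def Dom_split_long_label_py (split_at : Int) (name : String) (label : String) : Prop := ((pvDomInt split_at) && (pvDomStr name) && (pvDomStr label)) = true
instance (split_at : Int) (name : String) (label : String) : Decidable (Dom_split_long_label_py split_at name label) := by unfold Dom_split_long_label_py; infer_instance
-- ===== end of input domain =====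

-- B computes the rendered length by staged passes (split on backslash, then sum per-part
-- contributions) instead of A's single stateful scan, and locates the split point with
-- rfind instead of reverse+index with try/except (objective: alternative).

-- ===== PORT A =====
-- one loop step of A's state machine over (is_greek, length)
def pvStepA (s : Bool × Int) (c : Char) : Bool × Int :=
  let length := if s.1 = false then s.2 + 1 else s.2
  let st := if s.1 && !(PySem.Chars.isalpha c) then (false, length + 1) else (s.1, length)
  (if c = '\\' then true else st.1, st.2)

def split_long_label_py (split_at : Int) (name : String) (label : String) : String :=
  -- label.translate({ord(i): None for i in "{}$_^"}) deletes exactly these chars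
  let render_label : List Char := label.toList.filter (fun c => decide (c ∉ "{}$_^".toList))
  let length : Int := (render_label.foldl pvStepA (false, 0)).2
  if length ≥ split_at then
    let split_index : Int :=
      -- label[:split_at][::-1].index(" "), ValueError → len(name)
      match PySem.List.index? (PySem.List.slice label.toList none (some split_at)).reverse ' ' with
      | some i => min ((name.toList.length : Int)) (split_at - (i : Int))
      | none => (name.toList.length : Int)
    String.ofList (PySem.List.slice label.toList (some 0) (some split_index) ++
               '\n' :: PySem.List.slice label.toList (some split_index) none)
  else label

-- ===== PORT B =====
-- LETTERS constant of Source B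
def pvLetters : List Char := "abcdefghijklmnopqrstuvwxyzABCDEFGHIJKLMNOPQRSTUVWXYZ".toList

-- hand port of Python's str.split(sep) for a one-character separator (keeps empty parts)
def pvSplitChar (sep : Char) : List Char → List (List Char)
  | [] => [[]]
  | c :: rest =>
    let r := pvSplitChar sep rest
    if c = sep then [] :: r else (c :: r.headI) :: r.tail

-- hand port of Python's str.rfind(ch): index of the last occurrence, -1 if absent
def pvRFind (l : List Char) (c : Char) : Int :=
  match PySem.List.index? l.reverse c with
  | some i => (l.length : Int) - 1 - (i : Int)
  | none => -1

def split_long_label_py_alt (split_at : Int) (name : String) (label : String) : String :=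
  let render_label : List Char := label.toList.filter (fun c => decide (c ∉ "{}$_^".toList))
  let parts := pvSplitChar '\\' render_label
  -- len(parts[0]) + sum(1 + len(p.lstrip(LETTERS)) for p in parts[1:])
  let length : Int := (parts.headI.length : Int) +
      (parts.tail.map (fun p => 1 + ((p.dropWhile (fun c => decide (c ∈ pvLetters))).length : Int))).sum
  if length ≥ split_at then
    let cut := PySem.List.slice label.toList none (some split_at)
    let pos : Int := pvRFind cut ' '
    let split_index : Int :=
      if pos < 0 then (name.toList.length : Int)
      else min ((name.toList.length : Int)) (split_at - ((cut.length : Int) - 1 - pos))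
    String.ofList (PySem.List.slice label.toList (some 0) (some split_index) ++
               '\n' :: PySem.List.slice label.toList (some split_index) none)
  else label

-- ===== PRECONDITION & SPEC =====
def Spec_split_long_label_py (split_at : Int) (name : String) (label : String) (out : String) : Prop := out = split_long_label_py_alt split_at name label
instance (split_at : Int) (name : String) (label : String) (out : String) : Decidable (Spec_split_long_label_py split_at name label out) := by unfold Spec_split_long_label_py; infer_instance

-- ===== CLAIM (what is proved, stated in full; the proofs are below) =====
def Claim_equal_split_long_label_py : Prop := ∀ (split_at : Int) (name : String) (label : String), Dom_split_long_label_py split_at name label → Spec_split_long_label_py split_at name label (split_long_label_py split_at name label)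

-- ===== LEMMAS AND PROOFS =====

-- proof-only intermediate: A's state machine, reformulated as consuming recursion
def pvScanLen : List Char → Int
  | [] => 0
  | c :: rest =>
    if c = '\\' then 1 + pvScanLen (rest.dropWhile (fun d => PySem.Chars.isalpha d))
    else 1 + pvScanLen rest
termination_by l => l.length
decreasing_by
  · have := List.length_dropWhile_le (fun d => PySem.Chars.isalpha d) rest
    simp; omega
  · simp

-- while is_greek, alpha characters are skipped; the first non-alpha character is then
-- processed exactly as from the non-greek state
theorem foldl_stepA_true (l : List Char) (n : Int) :
    (l.foldl pvStepA (true, n)).2 = ((l.dropWhile (fun d => PySem.Chars.isalpha d)).foldl pvStepA (false, n)).2 := by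
  induction l generalizing n with
  | nil => rfl
  | cons c rest ih =>
    by_cases ha : PySem.Chars.isalpha c = true
    · have hne : c ≠ '\\' := by
        intro h; subst h; revert ha; decide
      have h0 : pvStepA (true, n) c = (true, n) := by
        simp [pvStepA, ha, hne]
      simp [List.dropWhile, ha, h0, ih]
    · simp only [List.foldl_cons]
      have h1 : pvStepA (true, n) c = pvStepA (false, n) c := by
        simp [pvStepA, ha]
      rw [h1]
      simp [List.dropWhile, ha]

theorem foldl_stepA_false (l : List Char) (n : Int) :
    (l.foldl pvStepA (false, n)).2 = n + pvScanLen l := by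
  induction hl : l.length using Nat.strong_induction_on generalizing l n with
  | _ k ih =>
    match l with
    | [] => simp [pvScanLen]
    | c :: rest =>
      by_cases hb : c = '\\'
      · subst hb
        have hstep : pvStepA (false, n) '\\' = (true, n + 1) := by
          simp [pvStepA]
        simp only [List.foldl_cons, hstep, foldl_stepA_true, pvScanLen, reduceIte]
        have hlt : (rest.dropWhile (fun d => PySem.Chars.isalpha d)).length < k := by
          have := List.length_dropWhile_le (fun d => PySem.Chars.isalpha d) rest
          simp at hl; omega
        rw [ih _ hlt _ _ rfl]; ring
      · have hstep : pvStepA (false, n) c = (false, n + 1) := by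
          simp [pvStepA, hb]
        simp only [List.foldl_cons, hstep, pvScanLen, if_neg hb]
        have hlt : rest.length < k := by simp at hl; omega
        rw [ih _ hlt _ _ rfl]; ring

-- split never produces the empty list of parts
theorem pvSplitChar_ne_nil (sep : Char) (l : List Char) : pvSplitChar sep l ≠ [] := by
  cases l with
  | nil => simp [pvSplitChar]
  | cons c rest => simp only [pvSplitChar]; split <;> simp

-- every character of a part comes from the split input
theorem mem_of_mem_pvSplitChar (sep : Char) (l : List Char) (p : List Char) (c : Char)
    (hp : p ∈ pvSplitChar sep l) (hc : c ∈ p) : c ∈ l := by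
  induction l generalizing p with
  | nil =>
    simp [pvSplitChar] at hp; subst hp; simp at hc
  | cons x rest ih =>
    simp only [pvSplitChar] at hp
    by_cases hx : x = sep
    · simp only [if_pos hx, List.mem_cons] at hp
      rcases hp with h | h
      · subst h; simp at hc
      · exact List.mem_cons_of_mem _ (ih p h hc)
    · simp only [if_neg hx, List.mem_cons] at hp
      obtain ⟨h1, t1, hr⟩ := List.exists_cons_of_ne_nil (pvSplitChar_ne_nil sep rest)
      rcases hp with h | h
      · subst h
        rcases List.mem_cons.mp hc with h | h
        · subst h; exact List.mem_cons_self
        · rw [hr] at h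
          exact List.mem_cons_of_mem _ (ih _ (by rw [hr]; exact List.mem_cons_self) (by simpa using h))
      · rw [hr] at h
        exact List.mem_cons_of_mem _ (ih p (by rw [hr]; exact List.mem_cons_of_mem _ h) hc)

-- splitting after dropping a prefix of non-separator characters only trims the first part
theorem pvSplitChar_dropWhile (sep : Char) (p : Char → Bool) (hsep : p sep = false) (l : List Char) :
    pvSplitChar sep (l.dropWhile p) =
      ((pvSplitChar sep l).headI.dropWhile p) :: (pvSplitChar sep l).tail := by
  induction l with
  | nil => simp [pvSplitChar]
  | cons c rest ih =>
    by_cases hc : p c = true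
    · have hne : c ≠ sep := by intro h; rw [h, hsep] at hc; exact absurd hc (by simp)
      rw [List.dropWhile_cons_of_pos hc, ih]
      obtain ⟨h1, t1, hr⟩ := List.exists_cons_of_ne_nil (pvSplitChar_ne_nil sep rest)
      simp [pvSplitChar, hne, hr, List.dropWhile_cons_of_pos hc]
    · rw [List.dropWhile_cons_of_neg (by simpa using hc)]
      by_cases hce : c = sep
      · simp [pvSplitChar, hce]
      · obtain ⟨h1, t1, hr⟩ := List.exists_cons_of_ne_nil (pvSplitChar_ne_nil sep rest)
        simp [pvSplitChar, hce, hr, List.dropWhile_cons_of_neg (by simpa using hc)]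

-- B's staged computation (with the isalpha predicate) equals the consuming recursion
theorem pvScanLen_eq_split (l : List Char) :
    pvScanLen l =
      ((pvSplitChar '\\' l).headI.length : Int) +
      ((pvSplitChar '\\' l).tail.map
        (fun p => 1 + ((p.dropWhile (fun d => PySem.Chars.isalpha d)).length : Int))).sum := by
  induction hl : l.length using Nat.strong_induction_on generalizing l with
  | _ k ih =>
    match l with
    | [] => simp [pvScanLen, pvSplitChar]
    | c :: rest =>
      obtain ⟨h1, t1, hr⟩ := List.exists_cons_of_ne_nil (pvSplitChar_ne_nil '\\' rest)
      by_cases hb : c = '\\'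
      · subst hb
        have hdw : pvSplitChar '\\' (rest.dropWhile (fun d => PySem.Chars.isalpha d)) =
            (h1.dropWhile (fun d => PySem.Chars.isalpha d)) :: t1 := by
          rw [pvSplitChar_dropWhile '\\' _ (by decide) rest, hr]; simp
        have hlt : (rest.dropWhile (fun d => PySem.Chars.isalpha d)).length < k := by
          have := List.length_dropWhile_le (fun d => PySem.Chars.isalpha d) rest
          simp at hl; omega
        have ihr := ih _ hlt _ rfl
        rw [hdw] at ihr
        simp only [pvScanLen, reduceIte, pvSplitChar, hr]
        simp only [List.headI, List.tail, List.map_cons, List.sum_cons] at ihr ⊢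
        rw [ihr]; simp only [List.length_nil, Nat.cast_zero]; ring
      · have hlt : rest.length < k := by simp at hl; omega
        have ihr := ih _ hlt _ rfl
        rw [hr] at ihr
        simp only [pvScanLen, pvSplitChar, hr, if_neg hb]
        simp only [List.headI, List.tail, List.length_cons] at ihr ⊢
        rw [ihr]; push_cast; ring

set_option maxRecDepth 8192 in
-- on the ASCII domain, Python's isalpha coincides with membership in Source B's LETTERS
theorem isalpha_eq_mem_pvLetters (c : Char) (h : pvDomChar c = true) :
    PySem.Chars.isalpha c = decide (c ∈ pvLetters) := by
  have hle : c.toNat < 127 := by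
    simp [pvDomChar] at h; omega
  have key : ∀ n : Fin 127,
      PySem.Chars.isalpha (Char.ofNat n.val) = decide ((Char.ofNat n.val) ∈ pvLetters) := by decide
  have := key ⟨c.toNat, hle⟩
  simpa [Char.ofNat_toNat] using this

-- dropWhile only depends on the predicate's values on the list's elements
theorem pvDropWhile_congr {p q : Char → Bool} {l : List Char}
    (h : ∀ c ∈ l, p c = q c) : l.dropWhile p = l.dropWhile q := by
  induction l with
  | nil => rfl
  | cons c rest ih =>
    have hc := h c List.mem_cons_self
    by_cases hp : p c = true
    · rw [List.dropWhile_cons_of_pos hp, List.dropWhile_cons_of_pos (hc ▸ hp),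
        ih (fun d hd => h d (List.mem_cons_of_mem _ hd))]
    · rw [List.dropWhile_cons_of_neg (by simpa using hp),
        List.dropWhile_cons_of_neg (by rw [← hc]; simpa using hp)]

-- the two split-index computations agree
theorem index_eq (cut : List Char) (nl sa : Int) :
    (match PySem.List.index? cut.reverse ' ' with
      | some i => min nl (sa - (i : Int))
      | none => nl) =
    (if pvRFind cut ' ' < 0 then nl
     else min nl (sa - ((cut.length : Int) - 1 - pvRFind cut ' '))) := by
  unfold pvRFind
  cases hidx : PySem.List.index? cut.reverse ' ' with
  | none => simp
  | some i =>
    have hi : i < cut.length := by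
      obtain ⟨pre, suf, hcat, hlen, _⟩ := (PySem.List.index?_eq_some_iff _ _ _).mp hidx
      have : cut.reverse.length = pre.length + (suf.length + 1) := by rw [hcat]; simp
      simp at this; omega
    have hpos : ¬ ((cut.length : Int) - 1 - (i : Int) < 0) := by omega
    simp only [if_neg hpos]
    have : sa - ((cut.length : Int) - 1 - ((cut.length : Int) - 1 - (i : Int))) = sa - (i : Int) := by omega
    rw [this]

-- ===== VERDICT (by name: the statement is the Claim_ definition above) =====
theorem split_long_label_py_spec : Claim_equal_split_long_label_py := by
  intro split_at name label hdom
  unfold Spec_split_long_label_py split_long_label_py split_long_label_py_alt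
  dsimp only
  have hdomL : ∀ c ∈ label.toList, pvDomChar c = true := by
    have : pvDomStr label = true := by
      simp [Dom_split_long_label_py] at hdom; tauto
    simpa [pvDomStr, List.all_eq_true] using this
  set render_label := label.toList.filter (fun c => decide (c ∉ "{}$_^".toList)) with hrl
  -- the two length computations agree on the domain
  have hmap :
      ((pvSplitChar '\\' render_label).tail.map
        (fun p => 1 + ((p.dropWhile (fun c => decide (c ∈ pvLetters))).length : Int))) =
      ((pvSplitChar '\\' render_label).tail.map
        (fun p => 1 + ((p.dropWhile (fun d => PySem.Chars.isalpha d)).length : Int))) := by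
    apply List.map_congr_left
    intro p hp
    have hdw : p.dropWhile (fun c => decide (c ∈ pvLetters)) =
        p.dropWhile (fun d => PySem.Chars.isalpha d) := by
      apply pvDropWhile_congr
      intro c hc
      have hcl : c ∈ label.toList :=
        List.mem_of_mem_filter
          (mem_of_mem_pvSplitChar '\\' render_label p c (List.mem_of_mem_tail hp) hc)
      rw [isalpha_eq_mem_pvLetters c (hdomL c hcl)]
    rw [hdw]
  have hlen : (render_label.foldl pvStepA (false, 0)).2 =
      ((pvSplitChar '\\' render_label).headI.length : Int) +
      ((pvSplitChar '\\' render_label).tail.map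
        (fun p => 1 + ((p.dropWhile (fun c => decide (c ∈ pvLetters))).length : Int))).sum := by
    rw [foldl_stepA_false, hmap, ← pvScanLen_eq_split]; ring
  rw [hlen, index_eq (PySem.List.slice label.toList none (some split_at)) (name.toList.length : Int) split_at]
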